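-- pv_equiv track=rewrite | github.com/on1dds/Excel-to-Nagios-config | xls2nag.py | align24
-- ===== SOURCE A (Python) =====
-- def align24(line):
--     count=0
--     line+='\t'
--     for c in line:
--         count+=1
--         if c=='\t':
--             count+=3
--     while count<=23:
--         line+='\t'
--         count+=4
--     return line
-- ===== SOURCE B (Python) =====
-- def align24(line):
--     count = len(line) + 4 + 3 * line.count('\t')
--     extra = 0 if count > 23 else (27 - count) // 4
--     return line + '\t' * (1 + extra)
-- ===== Notes on version B (the rewrite author's own statement) =====
-- stated objective: simpler
-- what changed: Replaced A's per-character counting loop and tab-appending while-loop with closed-form arithmetic: count = len(line) + 4 + 3*(number of tabs in line) and a ceiling-division formula for the number of padding tabs.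
import Mathlib
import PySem

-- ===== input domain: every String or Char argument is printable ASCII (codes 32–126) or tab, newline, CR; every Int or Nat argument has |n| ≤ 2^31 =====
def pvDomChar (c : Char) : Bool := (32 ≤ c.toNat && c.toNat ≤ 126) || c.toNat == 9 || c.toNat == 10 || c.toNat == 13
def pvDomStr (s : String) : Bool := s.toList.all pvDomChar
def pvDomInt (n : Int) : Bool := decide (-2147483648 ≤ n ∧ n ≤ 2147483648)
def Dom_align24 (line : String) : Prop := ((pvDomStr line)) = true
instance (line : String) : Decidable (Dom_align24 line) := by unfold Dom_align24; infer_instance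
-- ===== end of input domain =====

-- B replaces A's per-character counting loop and tab-appending while-loop by closed-form arithmetic (objective: simpler).

-- ===== PORT A =====
-- the while loop: while count <= 23: line += '\t'; count += 4
def align24Loop (cs : List Char) (count : Nat) : List Char :=
  if count ≤ 23 then align24Loop (cs ++ ['\t']) (count + 4) else cs
  termination_by 24 - count

def align24 (line : String) : String :=
  let cs := line.toList ++ ['\t']          -- line += '\t'
  -- for c in line: count += 1; if c == '\t': count += 3
  let count := cs.foldl (fun acc c => if c = '\t' then acc + 4 else acc + 1) 0
  String.ofList (align24Loop cs count)

-- ===== PORT B =====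
def align24_alt (line : String) : String :=
  let cs := line.toList
  let count := cs.length + 4 + 3 * cs.count '\t'
  let extra := if count > 23 then 0 else (27 - count) / 4
  String.ofList (cs ++ List.replicate (1 + extra) '\t')

-- ===== PRECONDITION & SPEC =====
def Spec_align24 (line : String) (out : String) : Prop := out = align24_alt line
instance (line : String) (out : String) : Decidable (Spec_align24 line out) := by unfold Spec_align24; infer_instance

-- ===== CLAIM (what is proved, stated in full; the proofs are below) =====
def Claim_equal_align24 : Prop := ∀ (line : String), Dom_align24 line → Spec_align24 line (align24 line)

-- ===== LEMMAS AND PROOFS =====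

-- A's counting loop equals closed-form length + 3·tab-count
theorem align24_count (cs : List Char) (a : Nat) :
    cs.foldl (fun acc c => if c = '\t' then acc + 4 else acc + 1) a
      = a + cs.length + 3 * cs.count '\t' := by
  induction cs generalizing a with
  | nil => simp
  | cons c cs ih =>
    simp only [List.foldl_cons, List.count_cons, ih, List.length_cons]
    by_cases h : c = '\t' <;> simp [h] <;> ring

-- A's while loop appends exactly the closed-form number of tabs
theorem align24Loop_eq (count : Nat) (cs : List Char) :
    align24Loop cs count
      = cs ++ List.replicate (if count > 23 then 0 else (27 - count) / 4) '\t' := by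
  by_cases h : count ≤ 23
  · rw [align24Loop, if_pos h, align24Loop_eq (count + 4)]
    have hk : (if count > 23 then 0 else (27 - count) / 4)
        = (if count + 4 > 23 then 0 else (27 - (count + 4)) / 4) + 1 := by
      split_ifs <;> omega
    rw [hk, List.append_assoc]
    congr 1
  · rw [align24Loop]
    simp [h, Nat.lt_of_not_le h]
  termination_by 24 - count

-- ===== VERDICT (by name: the statement is the Claim_ definition above) =====
theorem align24_spec : Claim_equal_align24 := by
  intro line _
  show align24 line = align24_alt line
  unfold align24 align24_alt
  simp only [align24_count, align24Loop_eq]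
  have hc : (line.toList ++ ['\t']).length + 3 * (line.toList ++ ['\t']).count '\t'
      = line.toList.length + 4 + 3 * line.toList.count '\t' := by
    simp; omega
  rw [Nat.zero_add, hc, List.append_assoc, List.replicate_add]
  rfl
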